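-- pv_equiv track=rewrite | github.com/jaeheeLee17/BOJ_Algorithms | Level8_Pattern/1475.py | decorate_RoomNum
-- ===== SOURCE A (Python) =====
-- def decorate_RoomNum(nums):
--     if '6' in nums:
--         nums = nums.replace('6', '9')
--     nums = list(nums)
--     sets_count = 1
--     for num in nums:
--         cnt = nums.count(num)
--         if num == '9':
--             cnt = (cnt // 2) + (cnt % 2)
--         if cnt > sets_count:
--             sets_count = cnt
--     return sets_count
-- ===== SOURCE B (Python) =====
-- def decorate_RoomNum(nums):
--     s = sorted(nums.replace('6', '9'))
--     best = 1
--     prev = None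
--     run = 0
--     for ch in s:
--         if ch == prev:
--             run += 1
--         else:
--             if prev is not None:
--                 cnt = run // 2 + run % 2 if prev == '9' else run
--                 if cnt > best:
--                     best = cnt
--             prev = ch
--             run = 1
--     if prev is not None:
--         cnt = run // 2 + run % 2 if prev == '9' else run
--         if cnt > best:
--             best = cnt
--     return best
-- ===== Notes on version B (the rewrite author's own statement) =====
-- stated objective: faster
-- what changed: B replaces 6 with 9, sorts the characters and scans the sorted run-lengths once (flushing each maximal run into a running maximum), instead of A's rescanning the whole list with .count for every character.
import Mathlib
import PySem

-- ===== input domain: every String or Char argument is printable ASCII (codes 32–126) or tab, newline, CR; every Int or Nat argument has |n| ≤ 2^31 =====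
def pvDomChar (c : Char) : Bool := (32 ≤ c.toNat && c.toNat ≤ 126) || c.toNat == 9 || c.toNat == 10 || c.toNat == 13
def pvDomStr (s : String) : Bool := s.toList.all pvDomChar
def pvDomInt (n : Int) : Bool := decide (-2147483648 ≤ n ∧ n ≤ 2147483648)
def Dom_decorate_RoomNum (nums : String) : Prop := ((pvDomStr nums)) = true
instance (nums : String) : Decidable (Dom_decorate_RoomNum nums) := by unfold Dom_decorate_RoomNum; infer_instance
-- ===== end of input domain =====

-- B replaces 6 by 9, sorts the characters and scans the sorted run-lengths once, instead of A's per-character .count rescans (measured faster on large inputs).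

-- ===== PORT A =====
def decorate_RoomNum (nums : String) : Int :=
  let nums1 := if PySem.Str.isIn "6" nums then PySem.Str.replace nums "6" "9" else nums
  let l := nums1.toList
  l.foldl (fun sets_count num =>
    let cnt : Int := (PySem.List.count l num : Int)
    let cnt := if num = '9' then PySem.Int.floordiv cnt 2 + PySem.Int.mod cnt 2 else cnt
    if cnt > sets_count then cnt else sets_count) 1

-- ===== PORT B =====
-- the final-run flush at the bottom of B's loop body / after the loop
def pvFlushB (best : Int) (prev : Option Char) (run : Int) : Int :=
  match prev with
  | none => best
  | some c =>
    let cnt := if c = '9' then PySem.Int.floordiv run 2 + PySem.Int.mod run 2 else run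
    if cnt > best then cnt else best

-- one iteration of B's loop over the sorted characters; state = (best, prev, run)
def pvStepB (st : Int × Option Char × Int) (ch : Char) : Int × Option Char × Int :=
  if some ch = st.2.1 then (st.1, st.2.1, st.2.2 + 1)
  else (pvFlushB st.1 st.2.1 st.2.2, some ch, 1)

def decorate_RoomNum_alt (nums : String) : Int :=
  let s := PySem.List.sorted (PySem.Str.replace nums "6" "9").toList (fun x => x) false
  let st := s.foldl pvStepB (1, none, 0)
  pvFlushB st.1 st.2.1 st.2.2

-- ===== PRECONDITION & SPEC =====
def Spec_decorate_RoomNum (nums : String) (out : Int) : Prop := out = decorate_RoomNum_alt nums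
instance (nums : String) (out : Int) : Decidable (Spec_decorate_RoomNum nums out) := by unfold Spec_decorate_RoomNum; infer_instance

-- ===== CLAIM (what is proved, stated in full; the proofs are below) =====
def Claim_equal_decorate_RoomNum : Prop := ∀ (nums : String), Dom_decorate_RoomNum nums → Spec_decorate_RoomNum nums (decorate_RoomNum nums)

-- ===== LEMMAS AND PROOFS =====

-- single-character replace IS a map over the characters
theorem pvGo_six (fuel : Nat) : ∀ (l acc : List Char), l.length ≤ fuel →
    PySem.Chars.replace.go ['6'] ['9'] fuel l acc
      = acc.reverse ++ l.map (fun c => if c = '6' then '9' else c) := by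
  induction fuel with
  | zero =>
    intro l acc h
    have : l = [] := List.eq_nil_of_length_eq_zero (Nat.le_zero.mp h)
    subst this; simp [PySem.Chars.replace.go]
  | succ n ih =>
    intro l acc h
    cases l with
    | nil => simp [PySem.Chars.replace.go]
    | cons c t =>
      by_cases hc : c = '6'
      · subst hc
        have hpre : List.isPrefixOf ['6'] ('6' :: t) = true := by
          simp [List.isPrefixOf]
        rw [PySem.Chars.replace.go, if_pos hpre]
        simp only [List.length_cons, List.length_nil, List.drop_succ_cons,
          List.drop_zero, List.reverse_cons, List.reverse_nil, List.nil_append,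
          List.singleton_append]
        rw [ih t ('9' :: acc) (by simpa using Nat.le_of_succ_le_succ h)]
        norm_num
      · have hpre : ¬ List.isPrefixOf ['6'] (c :: t) = true := by
          simp only [List.isPrefixOf, Bool.and_true, beq_iff_eq]
          exact fun e => hc e.symm
        rw [PySem.Chars.replace.go, if_neg hpre]
        rw [ih t (c :: acc) (by simpa using Nat.le_of_succ_le_succ h)]
        simp only [List.reverse_cons, List.append_assoc, List.singleton_append, List.map_cons,
          if_neg hc]

theorem pvReplace_six (s : String) :
    (PySem.Str.replace s "6" "9").toList
      = s.toList.map (fun c => if c = '6' then '9' else c) := by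
  show (String.ofList (PySem.Chars.replace s.toList "6".toList "9".toList)).toList = _
  rw [String.toList_ofList]
  show PySem.Chars.replace s.toList ['6'] ['9'] = _
  rw [PySem.Chars.replace]
  simp only [List.isEmpty]
  · exact pvGo_six s.toList.length s.toList [] (le_refl _)

-- if '6' does not occur, the map (hence replace) is the identity
theorem pvMap_six_id (l : List Char) (h : '6' ∉ l) :
    l.map (fun c => if c = '6' then '9' else c) = l := by
  have := List.map_congr_left (l := l) (f := fun c => if c = '6' then '9' else c) (g := id)
    (by intro c hc; have hne : c ≠ '6' := fun e => h (e ▸ hc); simp [hne])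
  simpa using this

-- a running max of a projection depends only on which elements occur
theorem pvFoldl_max_le (g : Char → Int) (m : List Char) (c : Int) :
    ∀ init, init ≤ c → (∀ x ∈ m, g x ≤ c) → m.foldl (fun a x => max a (g x)) init ≤ c := by
  induction m with
  | nil => intro init h0 _; simpa using h0
  | cons y t ih =>
    intro init h0 h
    simp only [List.foldl_cons]
    exact ih _ (max_le h0 (h y (by simp))) (fun x hx => h x (by simp [hx]))

theorem pvFoldl_max_mem_iff (g : Char → Int) (m m' : List Char) (init : Int)
    (h : ∀ x, x ∈ m ↔ x ∈ m') :
    m.foldl (fun a x => max a (g x)) init = m'.foldl (fun a x => max a (g x)) init := by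
  obtain ⟨h1, h2⟩ := PySem.List.le_foldl_max_int m g init
  obtain ⟨h1', h2'⟩ := PySem.List.le_foldl_max_int m' g init
  refine le_antisymm ?_ ?_
  · exact pvFoldl_max_le g m _ init h1' (fun x hx => h2' x ((h x).mp hx))
  · exact pvFoldl_max_le g m' _ init h1 (fun x hx => h2 x ((h x).mpr hx))

theorem pvIf_gt_eq_max (a b : Int) : (if b > a then b else a) = max a b := by
  rw [max_def]; split_ifs <;> omega

-- the adjusted frequency of a character: ceil(count/2) for '9', plain count otherwise
def pvG (m : List Char) (x : Char) : Int :=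
  if x = '9' then
    PySem.Int.floordiv (PySem.List.count m x : Int) 2 + PySem.Int.mod (PySem.List.count m x : Int) 2
  else (PySem.List.count m x : Int)

-- B's loop followed by the final flush
def pvWalk (l : List Char) (st : Int × Option Char × Int) : Int :=
  pvFlushB (l.foldl pvStepB st).1 (l.foldl pvStepB st).2.1 (l.foldl pvStepB st).2.2

-- a run of equal characters only extends the current run counter
theorem pvWalk_replicate (n : Nat) : ∀ (rest : List Char) (best run : Int) (c : Char),
    (List.replicate n c ++ rest).foldl pvStepB (best, some c, run)
      = rest.foldl pvStepB (best, some c, run + n) := by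
  induction n with
  | zero => intro rest best run c; simp
  | succ k ih =>
    intro rest best run c
    simp only [List.replicate_succ, List.cons_append, List.foldl_cons]
    rw [show pvStepB (best, some c, run) c = (best, some c, run + 1) by simp [pvStepB]]
    rw [ih rest best (run + 1) c]
    have h : run + 1 + (k : Int) = run + ((k + 1 : Nat) : Int) := by push_cast; ring
    rw [h]

-- when the current run cannot continue, flushing now and restarting is the same
theorem pvWalk_restart (rest : List Char) (best run : Int) (c : Char) (h : c ∉ rest) :
    pvWalk rest (best, some c, run) = pvWalk rest (pvFlushB best (some c) run, none, 0) := by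
  cases rest with
  | nil => simp [pvWalk, pvFlushB]
  | cons d t =>
    have hd : d ≠ c := fun e => h (by simp [e])
    simp only [pvWalk, List.foldl_cons]
    rw [show pvStepB (best, some c, run) d = (pvFlushB best (some c) run, some d, 1) by
      simp [pvStepB, hd]]
    rw [show pvStepB (pvFlushB best (some c) run, none, 0) d
        = (pvFlushB best (some c) run, some d, 1) by simp [pvStepB, pvFlushB]]

theorem pvFlushB_some (best run : Int) (c : Char) :
    pvFlushB best (some c) run
      = max best (if c = '9' then PySem.Int.floordiv run 2 + PySem.Int.mod run 2 else run) := by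
  simp only [pvFlushB]
  exact pvIf_gt_eq_max _ _

-- folding a run of equal characters into a running max is one max
theorem pvFoldl_max_replicate (g : Char → Int) (n : Nat) (c : Char) : ∀ (a : Int),
    (List.replicate n c).foldl (fun a x => max a (g x)) (max a (g c)) = max a (g c) := by
  induction n with
  | zero => intro a; simp
  | succ k ih =>
    intro a
    simp only [List.replicate_succ, List.foldl_cons, max_assoc, max_self]
    exact ih a

-- MAIN: on a sorted list, B's run-length walk computes the running max of the
-- adjusted counts, which is what A computes by rescanning
theorem pvWalk_sorted (n : Nat) : ∀ (l : List Char), l.length ≤ n →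
    l.Pairwise (· ≤ ·) → ∀ best : Int,
    pvWalk l (best, none, 0) = l.foldl (fun a x => max a (pvG l x)) best := by
  induction n with
  | zero =>
    intro l h _ best
    have : l = [] := List.eq_nil_of_length_eq_zero (Nat.le_zero.mp h)
    subst this; simp [pvWalk, pvFlushB]
  | succ k ih =>
    intro l hlen hsort best
    cases l with
    | nil => simp [pvWalk, pvFlushB]
    | cons c t =>
      obtain ⟨hct, htp⟩ := List.pairwise_cons.mp hsort
      set front := t.takeWhile (fun x => x == c) with hfront
      set rest := t.dropWhile (fun x => x == c) with hrest
      have hsplit : t = front ++ rest := (List.takeWhile_append_dropWhile).symm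
      have hfr : front = List.replicate front.length c := by
        rw [List.eq_replicate_iff]
        exact ⟨rfl, fun x hx => by
          have := List.mem_takeWhile_imp hx
          exact eq_of_beq this⟩
      have hrsub : rest.Sublist t := List.dropWhile_sublist _
      have hrp : rest.Pairwise (· ≤ ·) := htp.sublist hrsub
      have hcrest : c ∉ rest := by
        intro hc
        cases hhead : rest with
        | nil => rw [hhead] at hc; simp at hc
        | cons d r =>
          have hd9 : ¬ (d == c) = true := by
            have := List.head?_dropWhile_not (fun x => x == c) t
            rw [← hrest, hhead] at this
            simpa using this
          have hdc : d ≠ c := by simpa using hd9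
          have hcd : c ≤ d := hct d (hrsub.mem (by rw [hhead]; simp))
          rw [hhead] at hc
          rcases List.mem_cons.mp hc with h1 | h2
          · exact hdc h1.symm
          · have : d ≤ c := by
              have := List.pairwise_cons.mp (by rw [← hhead]; exact hrp)
              exact this.1 c h2
            exact hdc (le_antisymm this hcd)
      have hcount : PySem.List.count (c :: t) c = front.length + 1 := by
        rw [hsplit, hfr]
        simp [PySem.List.count, List.count_eq_zero.mpr hcrest]
      have hcount_rest : ∀ x ∈ rest, PySem.List.count (c :: t) x = PySem.List.count rest x := by
        intro x hx
        have hxc : ¬ c = x := fun e => hcrest (e ▸ hx)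
        rw [hsplit, hfr]
        simp [PySem.List.count, List.count_replicate, hxc]
      -- LHS: consume c, the run, flush, restart, apply IH on rest
      have hstep : pvStepB (best, none, 0) c = (best, some c, 1) := by
        simp [pvStepB, pvFlushB]
      have hlrest : rest.length ≤ k := by
        have h1 : rest.length ≤ t.length := hrsub.length_le
        have h2 : t.length + 1 ≤ k + 1 := by simpa using hlen
        omega
      have hg : (if c = '9' then PySem.Int.floordiv ((front.length + 1 : Nat) : Int) 2
            + PySem.Int.mod ((front.length + 1 : Nat) : Int) 2
          else ((front.length + 1 : Nat) : Int)) = pvG (c :: t) c := by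
        rw [pvG, hcount]
      have hfold : (c :: t).foldl pvStepB (best, none, 0)
          = rest.foldl pvStepB (best, some c, ((front.length + 1 : Nat) : Int)) := by
        rw [List.foldl_cons, hstep]
        conv_lhs => rw [hsplit, hfr]
        rw [pvWalk_replicate front.length rest best 1 c]
        have h1 : (1 : Int) + front.length = ((front.length + 1 : Nat) : Int) := by
          push_cast; ring
        rw [h1]
      have lhs_eq : pvWalk (c :: t) (best, none, 0)
          = rest.foldl (fun a x => max a (pvG rest x)) (max best (pvG (c :: t) c)) := by
        have hw1 : pvWalk (c :: t) (best, none, 0)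
            = pvWalk rest (best, some c, ((front.length + 1 : Nat) : Int)) := by
          unfold pvWalk; rw [hfold]
        rw [hw1, pvWalk_restart rest best _ c hcrest, pvFlushB_some, hg]
        exact ih rest hlrest hrp (max best (pvG (c :: t) c))
      rw [lhs_eq]
      -- RHS: the same value
      have rhs_eq : (c :: t).foldl (fun a x => max a (pvG (c :: t) x)) best
          = rest.foldl (fun a x => max a (pvG rest x)) (max best (pvG (c :: t) c)) := by
        set g := pvG (c :: t) with hg2
        conv_lhs => rw [hsplit, hfr]
        simp only [List.foldl_cons, List.foldl_append]
        rw [pvFoldl_max_replicate g front.length c best]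
        apply PySem.List.foldl_congr_mem
        intro acc x hx
        rw [hg2, show pvG (c :: t) x = pvG rest x from by
          rw [pvG, pvG, hcount_rest x hx]]
      rw [rhs_eq]

-- ===== VERDICT (by name: the statement is the Claim_ definition above) =====
theorem decorate_RoomNum_spec : Claim_equal_decorate_RoomNum := by
  intro nums _
  unfold Spec_decorate_RoomNum decorate_RoomNum decorate_RoomNum_alt
  have hm : (PySem.Str.replace nums "6" "9").toList
      = nums.toList.map (fun c => if c = '6' then '9' else c) := pvReplace_six nums
  set m : List Char := nums.toList.map (fun c => if c = '6' then '9' else c) with hmdef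
  have hl : (if PySem.Str.isIn "6" nums = true then PySem.Str.replace nums "6" "9" else nums).toList = m := by
    by_cases h6 : PySem.Str.isIn "6" nums = true
    · simp only [h6, if_pos]; exact hm
    · have hne : '6' ∉ nums.toList := by
        intro hmem
        obtain ⟨a, b, hab⟩ := List.append_of_mem hmem
        exact h6 ((PySem.Str.isIn_iff_infix "6" nums).mpr ⟨a, b, by rw [hab]; simp⟩)
      rw [if_neg h6, hmdef, pvMap_six_id nums.toList hne]
  dsimp only
  rw [hl, hm]
  set s : List Char := PySem.List.sorted m (fun x => x) false with hsdef
  have hperm : s.Perm m := PySem.List.sorted_perm m (fun x => x) false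
  have hsp : s.Pairwise (· ≤ ·) := by
    have := PySem.List.sorted_pairwise (xs := m) (key := fun x => x)
    simpa using this
  -- A's fold is a running max of pvG m
  have eA : m.foldl (fun sets_count num =>
        if (if num = '9' then
              PySem.Int.floordiv (PySem.List.count m num : Int) 2
                + PySem.Int.mod (PySem.List.count m num : Int) 2
            else (PySem.List.count m num : Int)) > sets_count then
          (if num = '9' then
              PySem.Int.floordiv (PySem.List.count m num : Int) 2
                + PySem.Int.mod (PySem.List.count m num : Int) 2
            else (PySem.List.count m num : Int))
        else sets_count) 1
      = m.foldl (fun a x => max a (pvG m x)) 1 := by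
    apply PySem.List.foldl_congr_mem
    intro acc x _
    exact pvIf_gt_eq_max acc (pvG m x)
  rw [eA]
  -- B's walk over the sorted list is a running max of pvG s
  have eB : pvWalk s (1, none, 0) = s.foldl (fun a x => max a (pvG s x)) 1 :=
    pvWalk_sorted s.length s (le_refl _) hsp 1
  show _ = pvWalk s (1, none, 0)
  rw [eB]
  -- counts agree under the permutation, and the same elements occur
  have hgs : ∀ x ∈ s, pvG s x = pvG m x := by
    intro x _
    rw [pvG, pvG]
    have : PySem.List.count s x = PySem.List.count m x := by
      simp [PySem.List.count, hperm.count_eq]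
    rw [this]
  have e2 : s.foldl (fun a x => max a (pvG s x)) 1 = s.foldl (fun a x => max a (pvG m x)) 1 := by
    apply PySem.List.foldl_congr_mem
    intro acc x hx
    rw [hgs x hx]
  rw [e2]
  exact pvFoldl_max_mem_iff (pvG m) m s 1 (fun x => hperm.mem_iff.symm)
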